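-- pv_equiv track=rewrite | github.com/adfb1233/python-learning | WEEK_2/Problemset_2/plates.py | numbers_at_end
-- ===== SOURCE A (Python) =====
-- def numbers_at_end(s):
--     number_started = False
--     for char in s:
--         if char.isdigit():
--             number_started = True
--         elif number_started and char.isalpha():
--             return False
--     return True
-- ===== SOURCE B (Python) =====
-- def numbers_at_end(s):
--     # Find the index of the first digit; the string is valid iff no letter
--     # occurs from that point onward.
--     i = 0
--     while i < len(s) and not s[i].isdigit():
--         i += 1
--     return not any(c.isalpha() for c in s[i:])
-- ===== Notes on version B (the rewrite author's own statement) =====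
-- stated objective: simpler
-- what changed: Replaces A's single stateful flag-carrying loop with a two-phase decomposition: locate the first digit, then check the suffix from there contains no letter.
import Mathlib
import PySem

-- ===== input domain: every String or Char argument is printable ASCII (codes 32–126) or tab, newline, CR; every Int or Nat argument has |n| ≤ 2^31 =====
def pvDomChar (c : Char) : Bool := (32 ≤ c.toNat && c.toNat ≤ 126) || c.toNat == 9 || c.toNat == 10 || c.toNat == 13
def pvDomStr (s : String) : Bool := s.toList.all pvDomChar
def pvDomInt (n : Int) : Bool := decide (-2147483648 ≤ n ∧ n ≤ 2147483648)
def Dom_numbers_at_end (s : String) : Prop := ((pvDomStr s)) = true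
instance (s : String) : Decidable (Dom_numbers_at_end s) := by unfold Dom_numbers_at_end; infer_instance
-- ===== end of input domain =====

-- B replaces A's stateful flag loop by: find the first digit, then check the suffix has no letter (simpler decomposition, same cost).

-- ===== PORT A =====
-- A's loop with early return, carrying the number_started flag
def numbersAtEndLoopA : List Char → Bool → Bool
  | [], _ => true
  | c :: cs, started =>
      if PySem.Chars.isdigit c then numbersAtEndLoopA cs true
      else if started && PySem.Chars.isalpha c then false
      else numbersAtEndLoopA cs started

def numbers_at_end (s : String) : Bool := numbersAtEndLoopA s.toList false

-- ===== PORT B =====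
-- Source B's while loop advancing i to the first digit, returned as the suffix s[i:]
def suffixFromFirstDigit : List Char → List Char
  | [] => []
  | c :: cs => if !PySem.Chars.isdigit c then suffixFromFirstDigit cs else c :: cs

def numbers_at_end_alt (s : String) : Bool :=
  !((suffixFromFirstDigit s.toList).any PySem.Chars.isalpha)

-- ===== PRECONDITION & SPEC =====
def Spec_numbers_at_end (s : String) (out : Bool) : Prop := out = numbers_at_end_alt s
instance (s : String) (out : Bool) : Decidable (Spec_numbers_at_end s out) := by unfold Spec_numbers_at_end; infer_instance

-- ===== CLAIM (what is proved, stated in full; the proofs are below) =====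
def Claim_equal_numbers_at_end : Prop := ∀ (s : String), Dom_numbers_at_end s → Spec_numbers_at_end s (numbers_at_end s)

-- ===== LEMMAS AND PROOFS =====

theorem not_isalpha_of_isdigit (c : Char) (h : PySem.Chars.isdigit c = true) :
    PySem.Chars.isalpha c = false := by
  simp [PySem.Chars.isdigit, PySem.Chars.isalpha, PySem.Chars.isupper, PySem.Chars.islower,
    Char.le_def, UInt32.le_iff_toNat_le] at *
  omega

-- once a digit has been seen, A returns true iff no letter remains
theorem loopA_true (l : List Char) :
    numbersAtEndLoopA l true = !(l.any PySem.Chars.isalpha) := by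
  induction l with
  | nil => rfl
  | cons c cs ih =>
      by_cases hd : PySem.Chars.isdigit c = true
      · simp [numbersAtEndLoopA, hd, ih, not_isalpha_of_isdigit c hd]
      · by_cases ha : PySem.Chars.isalpha c = true
        · simp [numbersAtEndLoopA, hd, ha]
        · simp [Bool.not_eq_true] at ha
          simp [numbersAtEndLoopA, hd, ha, ih]

theorem loopA_eq_alt (l : List Char) :
    numbersAtEndLoopA l false = !((suffixFromFirstDigit l).any PySem.Chars.isalpha) := by
  induction l with
  | nil => rfl
  | cons c cs ih =>
      by_cases hd : PySem.Chars.isdigit c = true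
      · simp [numbersAtEndLoopA, suffixFromFirstDigit, hd, loopA_true,
          not_isalpha_of_isdigit c hd]
      · simp [Bool.not_eq_true] at hd
        simp [numbersAtEndLoopA, suffixFromFirstDigit, hd, ih]

-- ===== VERDICT (by name: the statement is the Claim_ definition above) =====
theorem numbers_at_end_spec : Claim_equal_numbers_at_end := by
  intro s _
  unfold Spec_numbers_at_end numbers_at_end numbers_at_end_alt
  exact loopA_eq_alt s.toList
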